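-- pv_equiv track=rewrite | github.com/Afturecurt16/FinMAX | groups_schedule.py | _normalize_label
-- ===== SOURCE A (Python) =====
-- def _normalize_label(s: str) -> str:
--     s = (s or "").strip()
--     if "/" in s:
--         parts = [p.strip() for p in s.split("/") if p.strip()]
--         if parts:
--             parts.sort(key=len, reverse=True)
--             s = parts[0]
--     return s
-- ===== SOURCE B (Python) =====
-- def _normalize_label(s: str) -> str:
--     # Single character-level scan: walk the stripped string once, cutting at '/'
--     # and keeping the first strictly-longest stripped segment; no intermediate
--     # part list, no sort.
--     s = (s or "").strip()
--     if "/" not in s: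
--         return s
--     best = None
--     cur = []
--     for ch in s + "/":
--         if ch == "/":
--             seg = "".join(cur).strip()
--             cur = []
--             if seg and (best is None or len(best) < len(seg)):
--                 best = seg
--         else:
--             cur.append(ch)
--     return best if best is not None else s
-- ===== Notes on version B (the rewrite author's own statement) =====
-- stated objective: alternative
-- what changed: Replaces split('/') + strip-comprehension + filter + in-place sort by length descending + [0] with a single character-level scan of the stripped string that cuts at '/' and keeps the first strictly-longest stripped segment in an accumulator, building no part list and doing no sort.
import Mathlib
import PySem

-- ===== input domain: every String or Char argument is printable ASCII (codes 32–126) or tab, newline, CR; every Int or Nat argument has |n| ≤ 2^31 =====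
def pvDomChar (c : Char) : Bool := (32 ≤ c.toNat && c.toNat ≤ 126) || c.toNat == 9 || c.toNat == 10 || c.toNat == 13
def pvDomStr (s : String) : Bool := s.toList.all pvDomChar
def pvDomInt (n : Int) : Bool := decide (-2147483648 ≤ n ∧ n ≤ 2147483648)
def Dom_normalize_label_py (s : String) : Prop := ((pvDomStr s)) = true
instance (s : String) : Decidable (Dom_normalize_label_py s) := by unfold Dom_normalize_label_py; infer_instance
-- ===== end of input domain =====

-- B replaces split/strip-comprehension/sort-descending/[0] with one character-level scan of the
-- stripped string that cuts at '/' and keeps the first strictly-longest stripped segment.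

-- ===== PORT A =====
def normalize_label_py (s : String) : String :=
  let s := PySem.Str.strip s
  if PySem.Str.isIn "/" s then
    let parts := (((PySem.Str.split? s "/").getD []).map PySem.Str.strip).filter (fun p => p ≠ "")
    match PySem.List.sorted parts (fun p => PySem.Str.len p) true with
    | [] => s
    | p :: _ => p
  else s

-- ===== PORT B =====
-- one step of Source B's loop body: cut at '/', strip the pending segment, keep it if strictly longer
def nlpStep (st : Option (List Char) × List Char) (ch : Char) : Option (List Char) × List Char :=
  if ch = '/' then
    let seg := PySem.Chars.strip st.2
    (if !seg.isEmpty && (st.1.isNone || st.1.any (fun b => decide (b.length < seg.length)))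
       then some seg else st.1,
     [])
  else (st.1, st.2 ++ [ch])

def normalize_label_py_alt (s : String) : String :=
  let t := PySem.Str.strip s
  if PySem.Str.isIn "/" t then
    match ((t.toList ++ ['/']).foldl nlpStep (none, [])).1 with
    | some b => String.ofList b
    | none => t
  else t

-- ===== PRECONDITION & SPEC =====
def Spec_normalize_label_py (s : String) (out : String) : Prop := out = normalize_label_py_alt s
instance (s : String) (out : String) : Decidable (Spec_normalize_label_py s out) := by unfold Spec_normalize_label_py; infer_instance

-- ===== CLAIM (what is proved, stated in full; the proofs are below) =====
def Claim_equal_normalize_label_py : Prop := ∀ (s : String), Dom_normalize_label_py s → Spec_normalize_label_py s (normalize_label_py s)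

-- ===== LEMMAS AND PROOFS =====

-- A's result characterised: head of the reverse sort = Python's max(key), proved via insertBy

theorem head_insertBy_rev {α κ : Type} [LinearOrder κ] (key : α → κ) (x : α) (acc : List α) :
    (PySem.List.insertBy (fun a b => decide (key b < key a)) x acc).head? =
      (match acc.head? with
       | none => some x
       | some m => if key m < key x then some x else some m) := by
  cases acc with
  | nil => rfl
  | cons y ys =>
    simp only [PySem.List.insertBy, List.head?]
    by_cases h : key y < key x <;> simp [h]

theorem head_foldl_insertBy_rev {α κ : Type} [LinearOrder κ] (key : α → κ) (xs : List α) (acc : List α) :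
    (xs.foldl (fun acc x => PySem.List.insertBy (fun a b => decide (key b < key a)) x acc) acc).head? =
      xs.foldl
        (fun acc x =>
          match acc with
          | none => some x
          | some m => if key m < key x then some x else some m)
        acc.head? := by
  induction xs generalizing acc with
  | nil => rfl
  | cons x xs ih =>
    simp only [List.foldl]
    rw [ih, head_insertBy_rev]

theorem head_sorted_rev_eq_max? {α κ : Type} [LinearOrder κ] (xs : List α) (key : α → κ) :
    (PySem.List.sorted xs key true).head? = PySem.List.max? xs key := by
  simp only [PySem.List.sorted, PySem.List.max?]
  exact head_foldl_insertBy_rev key xs []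

-- proof-only helpers: char-level parts list and the two max-fold steps

def mstepN (acc : Option (List Char)) (x : List Char) : Option (List Char) :=
  match acc with
  | none => some x
  | some m => if m.length < x.length then some x else some m

def partsC (cs : List Char) : List (List Char) :=
  ((List.splitOnP (fun c => c == '/') cs).map PySem.Chars.strip).filter (fun q => q ≠ [])

-- PySem's fuel-based splitOn on a one-char separator is List.splitOnP

theorem go_eq (c : Char) (fuel : Nat) : ∀ (l cur : List Char) (acc : List (List Char)), l.length ≤ fuel →
    PySem.Chars.splitOn.go [c] fuel l cur acc =
      acc.reverse ++ List.modifyHead (fun q => cur.reverse ++ q) (List.splitOnP (fun x => x == c) l) := by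
  induction fuel with
  | zero =>
    intro l cur acc h
    have : l = [] := List.eq_nil_of_length_eq_zero (Nat.le_zero.mp h)
    subst this
    simp [PySem.Chars.splitOn.go]
  | succ n ih =>
    intro l cur acc h
    cases l with
    | nil => simp [PySem.Chars.splitOn.go]
    | cons d rest =>
      rw [List.splitOnP_cons]
      by_cases hd : d = c
      · subst hd
        have hpre : [d].isPrefixOf (d :: rest) = true := by simp [List.isPrefixOf]
        simp only [PySem.Chars.splitOn.go, hpre, if_true, List.length_cons, List.drop_succ_cons,
          List.length_nil, List.drop_zero]
        rw [ih rest [] (cur.reverse :: acc) (by simpa using Nat.lt_succ_iff.mp (by simpa using h))]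
        obtain ⟨q, qs, hq⟩ : ∃ q qs, List.splitOnP (fun x => x == d) rest = q :: qs := by
          cases hsp : List.splitOnP (fun x => x == d) rest with
          | nil => exact absurd hsp (List.splitOnP_ne_nil _ _)
          | cons q qs => exact ⟨q, qs, rfl⟩
        simp [hq]
      · have hpre : [c].isPrefixOf (d :: rest) = false := by
          simp [List.isPrefixOf]
          exact fun h' => absurd h'.symm hd
        simp only [PySem.Chars.splitOn.go, hpre, Bool.false_eq_true, if_false]
        rw [ih rest (d :: cur) acc (by simpa using Nat.lt_succ_iff.mp (by simpa using h))]
        have hdc : (d == c) = false := by simp [hd]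
        obtain ⟨q, qs, hq⟩ : ∃ q qs, List.splitOnP (fun x => x == c) rest = q :: qs := by
          cases hsp : List.splitOnP (fun x => x == c) rest with
          | nil => exact absurd hsp (List.splitOnP_ne_nil _ _)
          | cons q qs => exact ⟨q, qs, rfl⟩
        simp [hdc, hq]

theorem splitOn_single (c : Char) (cs : List Char) :
    PySem.Chars.splitOn cs [c] = List.splitOnP (fun x => x == c) cs := by
  unfold PySem.Chars.splitOn
  rw [go_eq c (cs.length + 1) cs [] [] (Nat.le_succ _)]
  obtain ⟨q, qs, hq⟩ : ∃ q qs, List.splitOnP (fun x => x == c) cs = q :: qs := by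
    cases hsp : List.splitOnP (fun x => x == c) cs with
    | nil => exact absurd hsp (List.splitOnP_ne_nil _ _)
    | cons q qs => exact ⟨q, qs, rfl⟩
  simp [hq]

theorem splitOnP_append_of_not {p : Char → Bool} (pre l : List Char) (h : ∀ x ∈ pre, p x = false) :
    List.splitOnP p (pre ++ l) = List.modifyHead (fun q => pre ++ q) (List.splitOnP p l) := by
  induction pre with
  | nil =>
    cases hsp : List.splitOnP p l with
    | nil => exact absurd hsp (List.splitOnP_ne_nil _ _)
    | cons q qs => simp [hsp]
  | cons a pre ih =>
    have ha : p a = false := h a (List.mem_cons_self ..)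
    rw [List.cons_append, List.splitOnP_cons, ha]
    simp only [Bool.false_eq_true, if_false]
    rw [ih (fun x hx => h x (List.mem_cons_of_mem _ hx))]
    cases hsp : List.splitOnP p l with
    | nil => exact absurd hsp (List.splitOnP_ne_nil _ _)
    | cons q qs => simp

-- the '/' step of B's scan, computed

theorem nlpStep_slash (best : Option (List Char)) (cur : List Char) :
    nlpStep (best, cur) '/' =
      (if PySem.Chars.strip cur = [] then best else mstepN best (PySem.Chars.strip cur), []) := by
  unfold nlpStep mstepN
  by_cases hseg : PySem.Chars.strip cur = [] <;> cases best <;>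
    simp [hseg]

-- B's scan over cs ++ ['/'] computes the first-longest fold over the char-level parts

theorem scan_eq : ∀ (cs : List Char) (best : Option (List Char)) (cur : List Char),
    (∀ x ∈ cur, x ≠ '/') →
    ((cs ++ ['/']).foldl nlpStep (best, cur)).1 = (partsC (cur ++ cs)).foldl mstepN best := by
  intro cs
  induction cs with
  | nil =>
    intro best cur hcur
    have hsp : List.splitOnP (fun c => c == '/') cur = [cur] := by
      have := splitOnP_append_of_not (p := fun c => c == '/') cur []
        (fun x hx => by simp; exact hcur x hx)
      simpa [List.splitOnP_nil] using this
    simp only [List.append_nil, List.nil_append, List.foldl_cons, List.foldl_nil, nlpStep_slash]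
    unfold partsC
    rw [hsp]
    by_cases hseg : PySem.Chars.strip cur = [] <;> simp [hseg]
  | cons ch cs ih =>
    intro best cur hcur
    by_cases hch : ch = '/'
    · subst hch
      simp only [List.cons_append, List.foldl_cons, nlpStep_slash]
      rw [ih _ [] (by simp)]
      have hsp : List.splitOnP (fun c => c == '/') (cur ++ '/' :: cs) =
          cur :: List.splitOnP (fun c => c == '/') cs := by
        rw [splitOnP_append_of_not cur _ (fun x hx => by simp; exact hcur x hx)]
        rw [List.splitOnP_cons]
        simp
      unfold partsC
      rw [hsp]
      by_cases hseg : PySem.Chars.strip cur = [] <;>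
        simp [hseg, List.map_cons]
    · have hstep : nlpStep (best, cur) ch = (best, cur ++ [ch]) := by
        unfold nlpStep
        simp [hch]
      simp only [List.cons_append, List.foldl_cons, hstep]
      rw [ih best (cur ++ [ch]) ?_]
      · rw [show cur ++ ch :: cs = (cur ++ [ch]) ++ cs by simp]
      · intro x hx
        rcases List.mem_append.mp hx with h | h
        · exact hcur x h
        · simp at h; subst h; exact hch

-- folding any string-level step that commutes with ofList is the char-level fold, mapped

theorem foldl_map_ofList_comm (G : Option String → String → Option String)
    (h : ∀ b x, G (Option.map String.ofList b) (String.ofList x) = Option.map String.ofList (mstepN b x)) :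
    ∀ (l : List (List Char)) (b : Option (List Char)),
    List.foldl G (Option.map String.ofList b) (l.map String.ofList) =
      Option.map String.ofList (l.foldl mstepN b) := by
  intro l
  induction l with
  | nil => intro b; rfl
  | cons x l ih =>
    intro b
    simp only [List.map_cons, List.foldl_cons, h]
    exact ih (mstepN b x)

theorem max?_map_ofList (l : List (List Char)) :
    PySem.List.max? (l.map String.ofList) (fun p => PySem.Str.len p) =
      Option.map String.ofList (l.foldl mstepN none) := by
  simp only [PySem.List.max?]
  exact foldl_map_ofList_comm _ (by
    intro b x
    have hl : ∀ y : List Char, PySem.Str.len (String.ofList y) = (y.length : Int) := by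
      intro y; simp [PySem.Str.len, String.toList_ofList]
    cases b with
    | none => rfl
    | some m =>
      show (if PySem.Str.len (String.ofList m) < PySem.Str.len (String.ofList x)
              then some (String.ofList x) else some (String.ofList m)) = _
      rw [hl, hl]
      simp only [mstepN]
      by_cases hmx : m.length < x.length
      · rw [if_pos (by exact_mod_cast hmx), if_pos hmx]; rfl
      · rw [if_neg (by exact_mod_cast hmx), if_neg hmx]; rfl) l none

-- A's parts list is the char-level parts list, mapped to strings

theorem partsStr_eq (t : String) :
    (((PySem.Str.split? t "/").getD []).map PySem.Str.strip).filter (fun p => p ≠ "") =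
      (partsC t.toList).map String.ofList := by
  have hsplit : PySem.Str.split? t "/" =
      some ((List.splitOnP (fun x => x == '/') t.toList).map String.ofList) := by
    show Option.map _ (PySem.Chars.split? t.toList "/".toList) = _
    have : "/".toList = ['/'] := rfl
    rw [this]
    simp [PySem.Chars.split?, splitOn_single]
  rw [hsplit]
  simp only [Option.getD_some, List.map_map]
  have hmaps : (PySem.Str.strip ∘ String.ofList) = (String.ofList ∘ PySem.Chars.strip) := by
    funext x
    simp [PySem.Str.strip, String.toList_ofList, Function.comp]
  rw [hmaps, ← List.map_map, List.filter_map]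
  unfold partsC
  congr 1
  apply List.filter_congr
  intro x _
  simp only [Function.comp]
  apply decide_eq_decide.mpr
  constructor
  · intro h hx; subst hx; exact h rfl
  · intro h he
    exact h (by rw [← String.toList_ofList (l := x), he]; rfl)

-- ===== VERDICT (by name: the statement is the Claim_ definition above) =====
theorem normalize_label_py_spec : Claim_equal_normalize_label_py := by
  intro s _
  unfold Spec_normalize_label_py normalize_label_py normalize_label_py_alt
  simp only []
  by_cases h : PySem.Str.isIn "/" (PySem.Str.strip s) = true
  · simp only [h, if_true]
    have hA := head_sorted_rev_eq_max?
      ((((PySem.Str.split? (PySem.Str.strip s) "/").getD []).map PySem.Str.strip).filter (fun p => p ≠ ""))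
      (fun p => PySem.Str.len p)
    rw [partsStr_eq] at hA
    rw [max?_map_ofList] at hA
    have hB := scan_eq (PySem.Str.strip s).toList none [] (by simp)
    simp only [List.nil_append] at hB
    rw [partsStr_eq]
    cases hR : (partsC (PySem.Str.strip s).toList).foldl mstepN none with
    | none =>
      rw [hR] at hA hB
      cases hs : PySem.List.sorted ((partsC (PySem.Str.strip s).toList).map String.ofList)
          (fun p => PySem.Str.len p) true with
      | nil => rw [hB]
      | cons p t =>
        rw [hs] at hA
        simp at hA
    | some b =>
      rw [hR] at hA hB
      cases hs : PySem.List.sorted ((partsC (PySem.Str.strip s).toList).map String.ofList)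
          (fun p => PySem.Str.len p) true with
      | nil => rw [hs] at hA; simp at hA
      | cons p t =>
        rw [hs] at hA
        simp only [List.head?_cons, Option.map_some, Option.some.injEq] at hA
        rw [hB, hA]
  · rw [Bool.not_eq_true] at h
    simp only [h, Bool.false_eq_true, if_false]
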